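-- pv_equiv track=rewrite | github.com/Reconnect-Reporting/Data-Pulling | JAM_Report.py | cumulative_cap
-- ===== SOURCE A (Python) =====
-- def cumulative_cap(seq, cap_idx):
--     total = 0
--     out = []
--     for i, v in enumerate(seq):
--         if i <= cap_idx:
--             total += int(v or 0)
--             out.append(total)
--         else:
--             out.append(0)
--     return out
-- ===== SOURCE B (Python) =====
-- def cumulative_cap(seq, cap_idx):
--     # Different algorithm: compute the grand capped total once, then a single
--     # backward sweep that emits the running value and subtracts each capped
--     # element, building the output back-to-front (zeros for non-capped indices).
--     total = sum(int(v or 0) for i, v in enumerate(seq) if i <= cap_idx)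
--     rev = []
--     running = total
--     for i, v in reversed(list(enumerate(seq))):
--         if i <= cap_idx:
--             rev.append(running)
--             running -= int(v or 0)
--         else:
--             rev.append(0)
--     rev.reverse()
--     return rev
-- ===== Notes on version B (the rewrite author's own statement) =====
-- stated objective: alternative
-- what changed: Instead of A's forward pass accumulating a running total, B computes the grand capped total up front and then does one backward sweep that subtracts each capped value, building the output back-to-front and reversing it once.
import Mathlib
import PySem

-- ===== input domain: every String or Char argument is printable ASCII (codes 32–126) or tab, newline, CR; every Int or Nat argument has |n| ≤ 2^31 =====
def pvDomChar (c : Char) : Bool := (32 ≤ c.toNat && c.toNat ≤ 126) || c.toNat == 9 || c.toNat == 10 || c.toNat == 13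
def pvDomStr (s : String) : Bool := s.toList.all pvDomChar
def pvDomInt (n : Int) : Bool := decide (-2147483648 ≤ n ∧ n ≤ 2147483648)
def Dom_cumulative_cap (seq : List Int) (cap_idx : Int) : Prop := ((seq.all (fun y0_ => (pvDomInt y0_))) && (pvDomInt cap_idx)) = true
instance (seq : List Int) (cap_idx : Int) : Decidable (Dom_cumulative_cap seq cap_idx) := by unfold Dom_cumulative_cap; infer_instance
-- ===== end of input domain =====

-- B replaces A's forward running-total pass by a backward sweep: grand capped total first,
-- then subtract each capped value walking right-to-left; objective: alternative (same O(n)).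

-- ===== PORT A =====
-- A's loop: enumerate with running total; per element either append the new total or append 0.
def cumulative_cap_loop (cap_idx : Int) : List Int → Nat → Int → List Int
  | [], _, _ => []
  | v :: rest, i, total =>
    if (i : Int) ≤ cap_idx then
      let vv : Int := if v = 0 then 0 else v   -- int(v or 0)
      (total + vv) :: cumulative_cap_loop cap_idx rest (i + 1) (total + vv)
    else
      0 :: cumulative_cap_loop cap_idx rest (i + 1) total

def cumulative_cap (seq : List Int) (cap_idx : Int) : List Int :=
  cumulative_cap_loop cap_idx seq 0 0

-- ===== PORT B =====
-- int(v or 0) on an int v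
def convOr (v : Int) : Int := if v = 0 then 0 else v

-- total = sum(int(v or 0) for i, v in enumerate(seq) if i <= cap_idx)
def capTotal (cap_idx : Int) (seq : List Int) : Int :=
  (((PySem.List.enumerate seq 0).filter (fun p => p.1 ≤ cap_idx)).map (fun p => convOr p.2)).sum

-- the backward for-loop over reversed(list(enumerate(seq))), appending to rev
def backSweep (cap_idx : Int) : List (Int × Int) → List Int → Int → List Int
  | [], rev, _ => rev
  | (i, v) :: rest, rev, running =>
    if i ≤ cap_idx then backSweep cap_idx rest (rev ++ [running]) (running - convOr v)
    else backSweep cap_idx rest (rev ++ [0]) running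

def cumulative_cap_alt (seq : List Int) (cap_idx : Int) : List Int :=
  (backSweep cap_idx (PySem.List.enumerate seq 0).reverse [] (capTotal cap_idx seq)).reverse

-- ===== PRECONDITION & SPEC =====
def Spec_cumulative_cap (seq : List Int) (cap_idx : Int) (out : List Int) : Prop := out = cumulative_cap_alt seq cap_idx
instance (seq : List Int) (cap_idx : Int) (out : List Int) : Decidable (Spec_cumulative_cap seq cap_idx out) := by unfold Spec_cumulative_cap; infer_instance

-- ===== CLAIM (what is proved, stated in full; the proofs are below) =====
def Claim_equal_cumulative_cap : Prop := ∀ (seq : List Int) (cap_idx : Int), Dom_cumulative_cap seq cap_idx → Spec_cumulative_cap seq cap_idx (cumulative_cap seq cap_idx)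

-- ===== LEMMAS AND PROOFS =====

-- common yardstick: prefix sum of converted values
def convP (seq : List Int) (k : Nat) : Int := ((seq.take k).map convOr).sum

-- proof-side simple recursion equivalent to backSweep with the accumulator factored out
def goB (cap_idx : Int) : List (Int × Int) → Int → List Int
  | [], _ => []
  | (i, v) :: rest, r =>
    (if i ≤ cap_idx then r else 0) :: goB cap_idx rest (if i ≤ cap_idx then r - convOr v else r)

theorem backSweep_eq_goB (cap_idx : Int) (l : List (Int × Int)) (rev : List Int) (r : Int) :
    backSweep cap_idx l rev r = rev ++ goB cap_idx l r := by
  induction l generalizing rev r with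
  | nil => simp [backSweep, goB]
  | cons p rest ih =>
    obtain ⟨i, v⟩ := p
    by_cases h : i ≤ cap_idx <;> simp [backSweep, goB, h, ih]

-- A's loop in closed form: at offset j the output is total + convP(take (j+1)) if capped, else 0.
theorem cumulative_cap_loop_eq (cap_idx : Int) (seq : List Int) (i : Nat) (total : Int) :
    cumulative_cap_loop cap_idx seq i total =
      (List.range seq.length).map
        (fun j => if ((i + j : Nat) : Int) ≤ cap_idx then total + convP seq (j + 1) else 0) := by
  induction seq generalizing i total with
  | nil => simp [cumulative_cap_loop]
  | cons v rest ih =>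
    simp only [List.length_cons, List.range_succ_eq_map, List.map_cons, List.map_map]
    by_cases h : (i : Int) ≤ cap_idx
    · simp only [cumulative_cap_loop, if_pos h]
      rw [ih (i + 1) (total + (if v = 0 then 0 else v))]
      refine congrArg₂ List.cons ?_ ?_
      · simp [convP, convOr, h]
      · refine List.map_congr_left (fun j _ => ?_)
        simp only [Function.comp_apply, Nat.succ_eq_add_one, convP, List.take_succ_cons,
          List.map_cons, List.sum_cons]
        have hji : ((i + 1 + j : Nat) : Int) = ((i + (j + 1) : Nat) : Int) := by push_cast; ring
        rw [hji]
        by_cases h2 : ((i + (j + 1) : Nat) : Int) ≤ cap_idx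
        · simp only [if_pos h2, convOr]
          split_ifs <;> ring
        · rw [if_neg h2, if_neg h2]
    · simp only [cumulative_cap_loop, if_neg h]
      rw [ih (i + 1) total]
      refine congrArg₂ List.cons ?_ ?_
      · simp [h]
      · refine List.map_congr_left (fun j _ => ?_)
        simp only [Function.comp_apply, Nat.succ_eq_add_one]
        have hc1 : ¬ ((i + (j + 1) : Nat) : Int) ≤ cap_idx := by push_cast at h ⊢; omega
        have hc2 : ¬ ((i + 1 + j : Nat) : Int) ≤ cap_idx := by push_cast at h ⊢; omega
        rw [if_neg hc2, if_neg hc1]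

-- capTotal over a list extended on the right
theorem capTotal_append (cap_idx : Int) (s : List Int) (a : Int) :
    capTotal cap_idx (s ++ [a]) =
      if (s.length : Int) ≤ cap_idx then capTotal cap_idx s + convOr a else capTotal cap_idx s := by
  unfold capTotal
  rw [PySem.List.enumerate_append, List.filter_append, List.map_append, List.sum_append]
  simp only [PySem.List.enumerate_cons, PySem.List.enumerate_nil]
  by_cases h : (s.length : Int) ≤ cap_idx <;>
    simp [h]

-- when every index of s is capped, capTotal is the full converted sum
theorem capTotal_full (cap_idx : Int) (s : List Int) (h : (s.length : Int) ≤ cap_idx + 1) :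
    capTotal cap_idx s = (s.map convOr).sum := by
  unfold capTotal
  rw [List.filter_eq_self.mpr]
  · calc (List.map (fun p => convOr p.2) (PySem.List.enumerate s)).sum
        = (List.map convOr ((PySem.List.enumerate s).map (fun x => x.2))).sum := by
          rw [List.map_map]; rfl
      _ = (List.map convOr s).sum := by rw [PySem.List.map_snd_enumerate]
  · intro p hp
    rcases (PySem.List.mem_enumerate_iff _ _ _).1 hp with ⟨k, hk, rfl⟩
    simp only [decide_eq_true_eq]
    omega

-- B's backward sweep, reversed, equals the same closed form as A's loop.
theorem goB_reverse_eq (cap_idx : Int) (s : List Int) :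
    (goB cap_idx (PySem.List.enumerate s 0).reverse (capTotal cap_idx s)).reverse =
      (List.range s.length).map (fun (j : Nat) => if (j : Int) ≤ cap_idx then convP s (j + 1) else 0) := by
  induction s using List.reverseRecOn with
  | nil => simp [PySem.List.enumerate_nil, goB]
  | append_singleton s a ih =>
    rw [PySem.List.enumerate_append]
    simp only [PySem.List.enumerate_cons, PySem.List.enumerate_nil, List.reverse_append,
      List.reverse_cons, List.reverse_nil, List.nil_append, List.cons_append, goB,
      List.length_append, List.length_cons, List.length_nil, Nat.zero_add]
    have hst : (if (0 + (s.length : Int)) ≤ cap_idx then capTotal cap_idx (s ++ [a]) - convOr a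
        else capTotal cap_idx (s ++ [a])) = capTotal cap_idx s := by
      rw [capTotal_append]
      by_cases h : (s.length : Int) ≤ cap_idx <;> simp [h]
    rw [hst, ih, List.range_succ, List.map_append]
    refine congrArg₂ (· ++ ·) ?_ ?_
    · refine List.map_congr_left (fun j hj => ?_)
      have hjl : j + 1 ≤ s.length := by
        have := List.mem_range.1 hj; omega
      rw [convP, convP, List.take_append_of_le_length hjl]
    · simp only [List.map_cons, List.map_nil, Int.zero_add]
      by_cases h : (s.length : Int) ≤ cap_idx
      · rw [if_pos h, if_pos h, convP, List.take_of_length_le (by simp), List.map_append,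
          List.sum_append, capTotal_append, if_pos h, capTotal_full cap_idx s (by omega)]
        simp [convOr]
      · rw [if_neg h, if_neg h]

-- ===== VERDICT (by name: the statement is the Claim_ definition above) =====
theorem cumulative_cap_spec : Claim_equal_cumulative_cap := by
  intro seq cap_idx _
  unfold Spec_cumulative_cap cumulative_cap cumulative_cap_alt
  rw [cumulative_cap_loop_eq, backSweep_eq_goB, List.nil_append, goB_reverse_eq]
  exact List.map_congr_left (fun j _ => by simp)
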